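-- pv_equiv track=rewrite | github.com/LautaroChioli/UBA | IP-2025-1º Cuatri/python/Parciales Viejos/repaso.py | empleados_del_mes
-- ===== SOURCE A (Python) =====
-- def empleados_del_mes(horas: dict[int, list[int]]) -> list[int]:
--     mejor_empleado = []
--     mejor_empleado_horas = 0
--     iguales = []
--     menores_en_lista = False
--     for id in horas:
--         horas_totales = sumatoria(horas[id])
--         if horas_totales >= mejor_empleado_horas:
--             mejor_empleado_horas = horas_totales
--             mejor_empleado.append((id, horas_totales))
--             for empleado_anterior in mejor_empleado:
--                 if empleado_anterior[1] < mejor_empleado_horas: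
--                     menores_en_lista = True
--                 if empleado_anterior[1] == mejor_empleado_horas:
--                     iguales.append(empleado_anterior)
--             if menores_en_lista:
--                 mejor_empleado.clear()
--                 for empleado in iguales:
--                     mejor_empleado.append(empleado)
--             iguales.clear()
--     res = []
--     for empleado in mejor_empleado:
--         res.append(empleado[0])
--     return res
--
-- def sumatoria(l):
--     tot = 0
--     for i in l:
--         tot += i
--     return tot
-- ===== SOURCE B (Python) =====
-- def empleados_del_mes(horas: dict[int, list[int]]) -> list[int]:
--     totales = {id: sum(hs) for id, hs in horas.items()}
--     best = max(max(totales.values(), default=0), 0)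
--     return [id for id, t in totales.items() if t == best]
-- ===== Notes on version B (the rewrite author's own statement) =====
-- stated objective: simpler
-- what changed: Replaces A's append-and-rescan running-best accumulator (with its sticky 'menores_en_lista' flag and clear/refill passes) by a one-pass totals table, a zero-floored max of its values, and a single filter of the table in insertion order; Pre_ only excludes association lists with duplicate ids, which cannot arise from the Python dict argument.
import Mathlib
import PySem

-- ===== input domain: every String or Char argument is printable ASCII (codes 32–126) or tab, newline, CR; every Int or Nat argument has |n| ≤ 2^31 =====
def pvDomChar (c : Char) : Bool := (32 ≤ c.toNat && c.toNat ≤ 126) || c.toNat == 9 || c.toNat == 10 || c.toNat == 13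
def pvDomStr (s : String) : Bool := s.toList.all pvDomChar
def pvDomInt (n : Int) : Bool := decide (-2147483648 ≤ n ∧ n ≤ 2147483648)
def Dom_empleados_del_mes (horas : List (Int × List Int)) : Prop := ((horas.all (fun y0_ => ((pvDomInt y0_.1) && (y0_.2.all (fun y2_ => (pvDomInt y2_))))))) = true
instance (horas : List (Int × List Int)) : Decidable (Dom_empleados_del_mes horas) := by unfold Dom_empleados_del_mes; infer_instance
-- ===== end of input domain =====

-- B replaces A's append-and-rescan running-best accumulator by a totals table,
-- a zero-floored max of its values, and one filter pass (simpler).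

-- ===== PORT A =====
def sumatoria (l : List Int) : Int := l.foldl (fun tot i => tot + i) 0

def empleados_del_mes (horas : List (Int × List Int)) : List Int :=
  -- state: (mejor_empleado, mejor_empleado_horas, menores_en_lista); iguales is
  -- empty at each iteration's start (the branch always clears it at its end).
  let st := horas.foldl (fun (st : List (Int × Int) × Int × Bool) p =>
      let ht := sumatoria ((PySem.Dict.mk horas).getD p.1 [])
      if st.2.1 ≤ ht then
        let mejor := st.1 ++ [(p.1, ht)]
        -- inner 'for empleado_anterior in mejor_empleado' computing menores_en_lista and iguales
        let r := mejor.foldl (fun (q : Bool × List (Int × Int)) e =>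
            ((if e.2 < ht then true else q.1), (if e.2 == ht then q.2 ++ [e] else q.2)))
          (st.2.2, [])
        ((if r.1 then r.2 else mejor), ht, r.1)
      else st)
    ([], 0, false)
  st.1.foldl (fun res e => res ++ [e.1]) []

-- ===== PORT B =====
def empleados_del_mes_alt (horas : List (Int × List Int)) : List Int :=
  let totales := horas.foldl (fun d p => d.insert p.1 (p.2.foldl (fun tot i => tot + i) 0)) (PySem.Dict.empty : PySem.Dict Int Int)
  let best := max ((PySem.List.max? totales.values (fun v => v)).getD 0) 0
  (totales.items.filter (fun p => p.2 == best)).map (fun p => p.1)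

-- ===== PRECONDITION & SPEC =====
-- Pre_ excludes association lists with duplicate ids: A's Python argument is a dict,
-- which never has duplicate keys, so these lists correspond to no Python input.
def Pre_empleados_del_mes (horas : List (Int × List Int)) : Prop :=
  (horas.map Prod.fst).Nodup
instance (horas : List (Int × List Int)) : Decidable (Pre_empleados_del_mes horas) := by unfold Pre_empleados_del_mes; infer_instance
def pvWitness_empleados_del_mes : (List (Int × List Int)) := [(1, [2, 3]), (2, [5]), (3, [-1, 4])]

def Spec_empleados_del_mes (horas : List (Int × List Int)) (out : List Int) : Prop := out = empleados_del_mes_alt horas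
instance (horas : List (Int × List Int)) (out : List Int) : Decidable (Spec_empleados_del_mes horas out) := by unfold Spec_empleados_del_mes; infer_instance

-- ===== CLAIM (what is proved, stated in full; the proofs are below) =====
def Claim_equal_empleados_del_mes : Prop := ∀ (horas : List (Int × List Int)), Dom_empleados_del_mes horas → Pre_empleados_del_mes horas → Spec_empleados_del_mes horas (empleados_del_mes horas)

-- ===== LEMMAS AND PROOFS =====

/-- total hours of one employee entry -/
def pvTot (p : Int × List Int) : Int := p.2.foldl (fun tot i => tot + i) 0

/-- the (id, total) pair an entry contributes -/
def pvF (p : Int × List Int) : Int × Int := (p.1, pvTot p)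

/-- A's running best, floored at 0 -/
def pvM (l : List (Int × List Int)) : Int := l.foldl (fun b p => max b (pvTot p)) 0

/-- A's loop body once the dict lookup is resolved to the entry's own list -/
def pvStep (st : List (Int × Int) × Int × Bool) (p : Int × List Int) :
    List (Int × Int) × Int × Bool :=
  let ht := pvTot p
  if st.2.1 ≤ ht then
    let mejor := st.1 ++ [(p.1, ht)]
    let r := mejor.foldl (fun (q : Bool × List (Int × Int)) e =>
        ((if e.2 < ht then true else q.1), (if e.2 == ht then q.2 ++ [e] else q.2)))
      (st.2.2, [])
    ((if r.1 then r.2 else mejor), ht, r.1)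
  else st

lemma pv_inner (mejor : List (Int × Int)) (ht : Int) (men : Bool) (acc : List (Int × Int)) :
    mejor.foldl (fun (q : Bool × List (Int × Int)) e =>
        ((if e.2 < ht then true else q.1), (if e.2 == ht then q.2 ++ [e] else q.2))) (men, acc)
      = (men || mejor.any (fun e => decide (e.2 < ht)), acc ++ mejor.filter (fun e => e.2 == ht)) := by
  induction mejor generalizing men acc with
  | nil => simp
  | cons e rest ih =>
    simp only [List.foldl_cons, List.any_cons, List.filter_cons]
    rw [ih]
    by_cases h1 : e.2 < ht <;> by_cases h2 : e.2 == ht <;>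
      simp [h1, h2]

lemma pv_M_append (l : List (Int × List Int)) (p : Int × List Int) :
    pvM (l ++ [p]) = max (pvM l) (pvTot p) := by
  simp [pvM, List.foldl_append]

lemma pv_tot_le (l : List (Int × List Int)) : ∀ p ∈ l, pvTot p ≤ pvM l :=
  (PySem.List.le_foldl_max_int l pvTot 0).2

lemma pv_A_inv (l : List (Int × List Int)) :
    (l.foldl pvStep ([], 0, false)).1 = (l.map pvF).filter (fun e => e.2 == pvM l)
      ∧ (l.foldl pvStep ([], 0, false)).2.1 = pvM l := by
  induction l using List.reverseRecOn with
  | nil => simp [pvM]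
  | append_singleton l p ih =>
    obtain ⟨h1, h2⟩ := ih
    rw [List.foldl_append, List.foldl_cons, List.foldl_nil, pv_M_append]
    by_cases hc : (l.foldl pvStep ([], 0, false)).2.1 ≤ pvTot p
    · have hMle : pvM l ≤ pvTot p := h2 ▸ hc
      simp only [pvStep, pv_inner, h1, h2]
      rw [if_pos hMle, max_eq_right hMle]
      dsimp only
      refine ⟨?_, rfl⟩
      have hsingle : (List.map pvF [p]).filter (fun e => e.2 == pvTot p) = [(p.1, pvTot p)] := by
        simp [pvF]
      conv_rhs => rw [List.map_append, List.filter_append, hsingle]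
      rcases eq_or_lt_of_le hMle with heq | hlt
      · -- tie with the running best: the filter keeps everything
        have hE : (l.map pvF).filter (fun e => e.2 == pvTot p)
            = (l.map pvF).filter (fun e => e.2 == pvM l) := by rw [heq]
        have hmf : ((l.map pvF).filter (fun e => e.2 == pvM l) ++ [(p.1, pvTot p)]).filter
              (fun e => e.2 == pvTot p)
            = (l.map pvF).filter (fun e => e.2 == pvM l) ++ [(p.1, pvTot p)] := by
          apply List.filter_eq_self.2
          intro e he
          rcases List.mem_append.1 he with he' | he'
          · have := List.of_mem_filter he'
            simp only [beq_iff_eq] at this ⊢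
            omega
          · simp only [List.mem_singleton] at he'
            subst he'
            simp
        conv_rhs => rw [hE]
        split <;> simp [hmf]
      · -- strictly better: only the new entry survives
        have h0 : (l.map pvF).filter (fun e => e.2 == pvTot p) = [] := by
          apply List.filter_eq_nil_iff.2
          intro e he
          obtain ⟨q, hq, rfl⟩ := List.mem_map.1 he
          have := pv_tot_le l q hq
          simp only [pvF, beq_iff_eq]
          omega
        have hnone : ((l.map pvF).filter (fun e => e.2 == pvM l)).filter
            (fun e => e.2 == pvTot p) = [] := by
          apply List.filter_eq_nil_iff.2
          intro e he
          have := List.of_mem_filter he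
          simp only [beq_iff_eq] at this ⊢
          omega
        conv_rhs => rw [h0, List.nil_append]
        have hmf : ((l.map pvF).filter (fun e => e.2 == pvM l) ++ [(p.1, pvTot p)]).filter
            (fun e => e.2 == pvTot p) = [(p.1, pvTot p)] := by
          rw [List.filter_append, hnone, List.nil_append]
          simp
        split
        · rw [hmf]; simp
        · -- the flag stayed false: nothing smaller was ever kept, so the old list is empty
          rename_i hb
          have hemp : (l.map pvF).filter (fun e => e.2 == pvM l) = [] := by
            rcases hq : (l.map pvF).filter (fun e => e.2 == pvM l) with _ | ⟨e, t⟩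
            · exact hq
            · exfalso
              have he : e ∈ (l.map pvF).filter (fun e => e.2 == pvM l) := by
                rw [hq]; exact List.mem_cons_self
              have h5 := List.of_mem_filter he
              simp only [beq_iff_eq] at h5
              apply hb
              rw [Bool.or_eq_true, List.any_eq_true]
              exact Or.inr ⟨e, List.mem_append_left _ he, by simp [h5]; omega⟩
          rw [hemp, List.nil_append]
    · have hlt : pvTot p < pvM l := by rw [h2] at hc; omega
      simp only [pvStep, if_neg hc]
      have hmax : max (pvM l) (pvTot p) = pvM l := max_eq_left (le_of_lt hlt)
      rw [hmax]
      refine ⟨?_, h2⟩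
      rw [List.map_append, List.filter_append, h1]
      have : ([p].map pvF).filter (fun e => e.2 == pvM l) = [] := by
        simp only [List.map_cons, List.map_nil, List.filter_cons, List.filter_nil, pvF]
        simp only [beq_iff_eq]
        rw [if_neg (by omega)]
      rw [this, List.append_nil]

lemma pv_A_eq (horas : List (Int × List Int)) (hpre : (horas.map Prod.fst).Nodup) :
    empleados_del_mes horas
      = ((horas.map pvF).filter (fun e => e.2 == pvM horas)).map (fun e => e.1) := by
  unfold empleados_del_mes
  have hcongr : horas.foldl (fun (st : List (Int × Int) × Int × Bool) p =>
      let ht := sumatoria ((PySem.Dict.mk horas).getD p.1 [])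
      if st.2.1 ≤ ht then
        let mejor := st.1 ++ [(p.1, ht)]
        let r := mejor.foldl (fun (q : Bool × List (Int × Int)) e =>
            ((if e.2 < ht then true else q.1), (if e.2 == ht then q.2 ++ [e] else q.2)))
          (st.2.2, [])
        ((if r.1 then r.2 else mejor), ht, r.1)
      else st) ([], 0, false)
      = horas.foldl pvStep ([], 0, false) := by
    apply PySem.List.foldl_congr_mem
    intro st p hp
    have hget : (PySem.Dict.mk horas).getD p.1 [] = p.2 := by
      apply PySem.Dict.getD_of_mem_items
      · exact hp
      · exact hpre
    simp only [pvStep, hget, sumatoria, pvTot]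
    rfl
  simp only [hcongr]
  rw [PySem.List.foldl_append_singleton_eq_map]
  rw [(pv_A_inv horas).1]
  simp

lemma pv_foldl_max_max (l : List Int) (a b : Int) :
    l.foldl max (max a b) = max a (l.foldl max b) := by
  induction l generalizing b with
  | nil => rfl
  | cons x t ih => rw [List.foldl_cons, List.foldl_cons, max_assoc, ih]

lemma pv_B_eq (horas : List (Int × List Int)) (hpre : (horas.map Prod.fst).Nodup) :
    empleados_del_mes_alt horas
      = ((horas.map pvF).filter (fun e => e.2 == pvM horas)).map (fun e => e.1) := by
  unfold empleados_del_mes_alt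
  have hitems : (horas.foldl (fun d p => d.insert p.1 (p.2.foldl (fun tot i => tot + i) 0))
        (PySem.Dict.empty : PySem.Dict Int Int)).items = horas.map pvF := by
    rw [PySem.Dict.items_foldl_insert_fresh]
    · rfl
    · intro a _; simp
    · exact hpre
  have hvals : (horas.foldl (fun d p => d.insert p.1 (p.2.foldl (fun tot i => tot + i) 0))
        (PySem.Dict.empty : PySem.Dict Int Int)).values = horas.map pvTot := by
    simp only [PySem.Dict.values, hitems]
    simp [pvF]
  have hbest : max ((PySem.List.max? (horas.map pvTot) (fun v => v)).getD 0) 0 = pvM horas := by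
    cases horas with
    | nil => simp [pvM, PySem.List.max?]
    | cons q rest =>
      rw [List.map_cons, PySem.List.max?_id_cons, Option.getD_some]
      have : pvM (q :: rest) = (rest.map pvTot).foldl max (max 0 (pvTot q)) := by
        simp [pvM, List.foldl_map]
      rw [this, pv_foldl_max_max, max_comm]
  simp only [hitems, hvals, hbest]

-- ===== VERDICT (by name: the statement is the Claim_ definition above) =====
theorem empleados_del_mes_spec : Claim_equal_empleados_del_mes := by
  intro horas _hdom hpre
  unfold Spec_empleados_del_mes
  rw [pv_A_eq horas hpre, pv_B_eq horas hpre]
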